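-- pv_equiv track=rewrite | github.com/bc6/Clara-Pretty-One-Dick | eve-8.51.857815/carbonui/services/command.py | GetFuncName
-- ===== SOURCE A (Python) =====
-- def GetFuncName(cmdname):
--     cmdname = cmdname.lower().strip()
--     for letter in ('_', ' '):
--         while cmdname.find(letter * 2) >= 0:
--             cmdname = cmdname.replace(letter * 2, letter)
--
--         _cmdname = cmdname.split(letter)
--         cmdname = ''
--         for part in _cmdname:
--             cmdname += '%s%s' % (part[0].upper(), part[1:])
--
--     return cmdname
-- ===== SOURCE B (Python) =====
-- def GetFuncName(cmdname):
--     s = cmdname.lower().strip()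
--     out = []
--     cap = True
--     for ch in s:
--         if ch == '_' or ch == ' ':
--             cap = True
--         else:
--             out.append(ch.upper() if cap else ch)
--             cap = False
--     return ''.join(out)
-- ===== Notes on version B (the rewrite author's own statement) =====
-- stated objective: simpler
-- what changed: Replaces A's two sequential per-separator passes (a while-loop collapsing doubled separators via replace, then split and capitalize-concatenate, once for '_' and once for ' ') with a single left-to-right scan that keeps a capitalize-next flag and skips separator characters.
-- crash fix: On inputs whose lowered-stripped form is empty or starts or ends with '_', A raises IndexError (part[0] of an empty split segment); B returns the concatenation of the capitalized nonempty segments (e.g. '' for ''). — e.g. on GetFuncName("_open"): A raises IndexError, B returns "Open"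
import Mathlib
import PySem

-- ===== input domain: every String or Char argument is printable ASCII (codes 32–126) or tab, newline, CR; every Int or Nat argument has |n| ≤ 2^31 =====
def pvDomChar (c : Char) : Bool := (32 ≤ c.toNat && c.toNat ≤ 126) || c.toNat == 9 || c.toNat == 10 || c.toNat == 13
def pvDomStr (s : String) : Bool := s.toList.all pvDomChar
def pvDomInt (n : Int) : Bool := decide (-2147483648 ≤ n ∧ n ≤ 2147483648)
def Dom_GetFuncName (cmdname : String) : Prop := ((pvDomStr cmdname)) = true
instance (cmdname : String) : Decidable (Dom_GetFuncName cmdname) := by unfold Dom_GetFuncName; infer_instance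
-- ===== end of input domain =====

-- B replaces A's two per-separator collapse/split/concatenate passes by one scan with a
-- capitalize-next flag (objective: simpler); return values agree on all inputs where A returns.

-- ===== PORT A =====
-- `pvRep` and the lemmas through `pv_replace_length_lt` exist only to justify termination of
-- `pvCollapse` (A's `while cmdname.find(letter*2) >= 0: cmdname = cmdname.replace(...)` loop),
-- which cites `pv_replace_length_lt` in its `decreasing_by`.
def pvRep (c : Char) : List Char → List Char
  | [] => []
  | [a] => [a]
  | a :: b :: t => if a = c ∧ b = c then c :: pvRep c t else a :: pvRep c (b :: t)

theorem pv_replace_go_eq (c : Char) : ∀ (fuel : Nat) (l acc : List Char), l.length ≤ fuel →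
    PySem.Chars.replace.go [c, c] [c] fuel l acc = acc.reverse ++ pvRep c l := by
  intro fuel
  induction fuel with
  | zero =>
    intro l acc h
    have : l = [] := by cases l <;> simp_all
    subst this
    simp [PySem.Chars.replace.go, pvRep]
  | succ n ih =>
    intro l acc h
    match l with
    | [] => simp [PySem.Chars.replace.go, pvRep]
    | [a] =>
      rw [PySem.Chars.replace.go]
      have hp : List.isPrefixOf [c, c] [a] = false := by
        cases h2 : (c == a) <;> simp [List.isPrefixOf, h2]
      rw [hp]
      simp only [Bool.false_eq_true, if_false]
      rw [ih [] (a :: acc) (by simp)]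
      simp [pvRep]
    | a :: b :: t =>
      rw [PySem.Chars.replace.go]
      by_cases hab : a = c ∧ b = c
      · have hp : List.isPrefixOf [c, c] (a :: b :: t) = true := by
          rw [hab.1, hab.2]; simp [List.isPrefixOf]
        rw [hp]
        simp only [if_true, List.length_cons, List.drop_succ_cons, List.drop_zero, List.length_nil]
        rw [ih t ([c].reverse ++ acc) (by simp at h ⊢; omega)]
        simp [pvRep, hab.1, hab.2]
      · have hp : List.isPrefixOf [c, c] (a :: b :: t) = false := by
          cases hac : (c == a)
          · simp [List.isPrefixOf, hac]
          · cases hbc : (c == b)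
            · simp [List.isPrefixOf, hac, hbc]
            · exact absurd ⟨(beq_iff_eq.mp hac).symm, (beq_iff_eq.mp hbc).symm⟩ hab
        rw [hp]
        simp only [Bool.false_eq_true, if_false]
        rw [ih (b :: t) (a :: acc) (by simp at h ⊢; omega)]
        simp [pvRep, hab]

theorem pv_replace_eq (c : Char) (s : List Char) :
    PySem.Chars.replace s [c, c] [c] = pvRep c s := by
  rw [PySem.Chars.replace]
  simp only [List.isEmpty_cons, if_false, Bool.false_eq_true]
  exact pv_replace_go_eq c s.length s [] (le_refl _)
theorem pvRep_length_le (c : Char) : ∀ s : List Char, (pvRep c s).length ≤ s.length := by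
  intro s
  fun_induction pvRep <;> simp_all <;> omega

theorem pvRep_length_lt (c : Char) : ∀ s : List Char, [c, c] <:+: s → (pvRep c s).length < s.length := by
  intro s
  fun_induction pvRep with
  | case1 => intro h; exact absurd h.length_le (by simp)
  | case2 a => intro h; exact absurd h.length_le (by simp)
  | case3 a b t hab ih =>
    intro _
    simp only [List.length_cons]
    have := pvRep_length_le c t
    omega
  | case4 a b t hab ih =>
    intro h
    rcases List.infix_cons_iff.mp h with hpre | hinf
    · rcases hpre with ⟨w, hw⟩
      injection hw with h1 hw2
      injection hw2 with h2 _
      exact absurd ⟨h1.symm, h2.symm⟩ hab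
    · simp only [List.length_cons]
      exact Nat.succ_lt_succ (ih hinf)

theorem pv_replace_length_lt (c : Char) (s : List Char) (h : 0 ≤ PySem.Chars.find s [c, c]) :
    (PySem.Chars.replace s [c, c] [c]).length < s.length := by
  rw [pv_replace_eq]
  exact pvRep_length_lt c s ((PySem.Chars.find_nonneg_iff s [c, c]).mp h)

def pvCollapse (c : Char) (s : List Char) : List Char :=
  if h : 0 ≤ PySem.Chars.find s [c, c] then
    pvCollapse c (PySem.Chars.replace s [c, c] [c])
  else s
termination_by s.length
decreasing_by exact pv_replace_length_lt c s h

-- '%s%s' % (part[0].upper(), part[1:]) — part[0] raises IndexError on an empty part (the .getD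
-- default is never reached on inputs satisfying Pre_GetFuncName, which excludes exactly those).
def pvCapA (part : List Char) : List Char :=
  [PySem.Chars.upperChar ((PySem.List.pyGet? part (0 : Int)).getD 'a')] ++
    PySem.List.slice part (some 1) none
-- one iteration of A's `for letter in ('_', ' ')` body: collapse doubles, split, capitalize+concat
def pvPassA (c : Char) (s : List Char) : List Char :=
  (PySem.Chars.splitOn (pvCollapse c s) [c]).foldl (fun acc part => acc ++ pvCapA part) []

def GetFuncName (cmdname : String) : String :=
  String.mk (pvPassA ' ' (pvPassA '_'
    (PySem.Chars.strip (PySem.Chars.lower cmdname.toList))))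

-- ===== PORT B =====
def pvScan : List Char → Bool → List Char
  | [], _ => []
  | a :: t, cap =>
    if a = '_' ∨ a = ' ' then pvScan t true
    else (if cap then PySem.Chars.upperChar a else a) :: pvScan t false

def GetFuncName_alt (cmdname : String) : String :=
  String.mk (pvScan (PySem.Chars.strip (PySem.Chars.lower cmdname.toList)) true)

-- ===== PRECONDITION & SPEC =====
-- Pre_ excludes exactly the inputs on which A raises IndexError (part[0] of an empty split
-- segment): those whose lowered-stripped form is empty or starts or ends with '_'.
def Pre_GetFuncName (cmdname : String) : Prop :=
  PySem.Chars.strip (PySem.Chars.lower cmdname.toList) ≠ [] ∧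
  (PySem.Chars.strip (PySem.Chars.lower cmdname.toList)).head? ≠ some '_' ∧
  (PySem.Chars.strip (PySem.Chars.lower cmdname.toList)).getLast? ≠ some '_'
instance (cmdname : String) : Decidable (Pre_GetFuncName cmdname) := by
  unfold Pre_GetFuncName; infer_instance

def pvWitness_GetFuncName : String := "open _Config  name"

-- On inputs whose lowered-stripped form is empty or starts or ends with '_', A raises
-- IndexError; B returns the concatenation of the capitalized nonempty segments.
def Raises_GetFuncName (cmdname : String) : Prop :=
  PySem.Chars.strip (PySem.Chars.lower cmdname.toList) = [] ∨
  (PySem.Chars.strip (PySem.Chars.lower cmdname.toList)).head? = some '_' ∨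
  (PySem.Chars.strip (PySem.Chars.lower cmdname.toList)).getLast? = some '_'
instance (cmdname : String) : Decidable (Raises_GetFuncName cmdname) := by
  unfold Raises_GetFuncName; infer_instance

def pvRaiseWitness_GetFuncName : String := "_open"
def pvRaiseWitnessOut_GetFuncName : String := "Open"

def Spec_GetFuncName (cmdname : String) (out : String) : Prop := out = GetFuncName_alt cmdname
instance (cmdname : String) (out : String) : Decidable (Spec_GetFuncName cmdname out) := by
  unfold Spec_GetFuncName; infer_instance

-- ===== CLAIM (what is proved, stated in full; the proofs are below) =====
def Claim_equal_GetFuncName : Prop := ∀ (cmdname : String), Dom_GetFuncName cmdname → Pre_GetFuncName cmdname → Spec_GetFuncName cmdname (GetFuncName cmdname)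
def Claim_raises_GetFuncName : Prop := (∀ (cmdname : String), Dom_GetFuncName cmdname → Raises_GetFuncName cmdname → ¬ Pre_GetFuncName cmdname) ∧ (Dom_GetFuncName (pvRaiseWitness_GetFuncName) ∧ Raises_GetFuncName (pvRaiseWitness_GetFuncName) ∧ GetFuncName_alt (pvRaiseWitness_GetFuncName) = pvRaiseWitnessOut_GetFuncName)

-- ===== LEMMAS AND PROOFS =====
theorem pv_toNat_ofNat_small (n : Nat) (h : n < 0xd800) : (Char.ofNat n).toNat = n := by
  rw [Char.toNat_ofNat, if_pos (Or.inl h)]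

theorem pv_char_le_iff (a b : Char) : a ≤ b ↔ a.toNat ≤ b.toNat := by
  rw [Char.le_def]
  exact UInt32.le_iff_toNat_le

theorem pv_toNat_a : ('a' : Char).toNat = 97 := rfl
theorem pv_toNat_z : ('z' : Char).toNat = 122 := rfl
theorem pv_toNat_sp : (' ' : Char).toNat = 32 := rfl

theorem up_up (a : Char) : PySem.Chars.upperChar (PySem.Chars.upperChar a) = PySem.Chars.upperChar a := by
  unfold PySem.Chars.upperChar PySem.Chars.islower
  split_ifs with h1 h2
  · exfalso
    simp only [Bool.and_eq_true, decide_eq_true_eq, pv_char_le_iff, pv_toNat_a, pv_toNat_z] at h1 h2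
    rw [pv_toNat_ofNat_small (a.toNat - 32) (by omega)] at h2
    omega
  · rfl
  · rfl

theorem up_ne_space (a : Char) (h : a ≠ ' ') : PySem.Chars.upperChar a ≠ ' ' := by
  unfold PySem.Chars.upperChar PySem.Chars.islower
  split_ifs with h1
  · simp only [Bool.and_eq_true, decide_eq_true_eq, pv_char_le_iff, pv_toNat_a, pv_toNat_z] at h1
    intro hc
    have := congrArg Char.toNat hc
    rw [pv_toNat_ofNat_small (a.toNat - 32) (by omega), pv_toNat_sp] at this
    omega
  · exact h
def pvSq (c : Char) : List Char → List Char
  | [] => []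
  | [a] => [a]
  | a :: b :: t => if a = c ∧ b = c then pvSq c (b :: t) else a :: pvSq c (b :: t)
def pvSpl (c : Char) : List Char → List (List Char)
  | [] => [[]]
  | a :: t => if a = c then [] :: pvSpl c t else
      match pvSpl c t with
      | [] => [[a]]
      | h :: r => (a :: h) :: r

def pvConsHead (x : List Char) : List (List Char) → List (List Char)
  | [] => []
  | h :: r => (x ++ h) :: r

theorem pvSpl_ne_nil (c : Char) (l : List Char) : pvSpl c l ≠ [] := by
  cases l with
  | nil => simp [pvSpl]
  | cons a t =>
    by_cases h : a = c
    · simp [pvSpl, h]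
    · simp only [pvSpl, if_neg h]
      cases pvSpl c t <;> simp

theorem pv_splitOn_go_eq (c : Char) : ∀ (fuel : Nat) (l cur : List Char) (acc : List (List Char)),
    l.length ≤ fuel →
    PySem.Chars.splitOn.go [c] fuel l cur acc =
      acc.reverse ++ pvConsHead cur.reverse (pvSpl c l) := by
  intro fuel
  induction fuel with
  | zero =>
    intro l cur acc h
    have : l = [] := by cases l <;> simp_all
    subst this
    simp [PySem.Chars.splitOn.go, pvSpl, pvConsHead]
  | succ n ih =>
    intro l cur acc h
    match l with
    | [] => simp [PySem.Chars.splitOn.go, pvSpl, pvConsHead]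
    | a :: t =>
      rw [PySem.Chars.splitOn.go]
      by_cases hac : a = c
      · have hp : List.isPrefixOf [c] (a :: t) = true := by
          rw [hac]; simp [List.isPrefixOf]
        rw [hp]
        simp only [if_true, List.length_cons, List.length_nil, List.drop_succ_cons, List.drop_zero]
        rw [ih t [] (cur.reverse :: acc) (by simp at h; omega)]
        obtain ⟨hh, hr, hsp⟩ : ∃ hh hr, pvSpl c t = hh :: hr := by
          cases hsp : pvSpl c t with
          | nil => exact absurd hsp (pvSpl_ne_nil c t)
          | cons x y => exact ⟨x, y, rfl⟩
        simp [pvSpl, hac, hsp, pvConsHead]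
      · have hp : List.isPrefixOf [c] (a :: t) = false := by
          cases h2 : (c == a)
          · simp [List.isPrefixOf, h2]
          · exact absurd (beq_iff_eq.mp h2).symm hac
        rw [hp]
        simp only [Bool.false_eq_true, if_false]
        rw [ih t (a :: cur) acc (by simp at h; omega)]
        obtain ⟨hh, hr, hsp⟩ : ∃ hh hr, pvSpl c t = hh :: hr := by
          cases hsp : pvSpl c t with
          | nil => exact absurd hsp (pvSpl_ne_nil c t)
          | cons x y => exact ⟨x, y, rfl⟩
        simp [pvSpl, hac, hsp, pvConsHead]

theorem pv_splitOn_eq (c : Char) (s : List Char) :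
    PySem.Chars.splitOn s [c] = pvSpl c s := by
  rw [PySem.Chars.splitOn]
  rw [pv_splitOn_go_eq c (s.length + 1) s [] [] (by omega)]
  obtain ⟨hh, hr, hsp⟩ : ∃ hh hr, pvSpl c s = hh :: hr := by
    cases hsp : pvSpl c s with
    | nil => exact absurd hsp (pvSpl_ne_nil c s)
    | cons x y => exact ⟨x, y, rfl⟩
  simp [hsp, pvConsHead]
theorem pvSq_head_c (c : Char) : ∀ t : List Char, (pvSq c (c :: t)).head? = some c := by
  intro t
  induction t with
  | nil => rfl
  | cons b t ih =>
    by_cases hb : b = c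
    · rw [show pvSq c (c :: b :: t) = pvSq c (b :: t) from by simp [pvSq, hb], hb]
      exact ih
    · simp only [pvSq]
      rw [if_neg (fun h => hb h.2)]
      rfl

theorem pvSq_head_ne (c a : Char) (t : List Char) (ha : a ≠ c) :
    (pvSq c (a :: t)).head? = some a := by
  cases t with
  | nil => rfl
  | cons b t =>
    simp only [pvSq]
    rw [if_neg (fun h => ha h.1)]
    rfl

theorem pvSq_cons_ne (c a : Char) (x : List Char) (ha : a ≠ c) :
    pvSq c (a :: x) = a :: pvSq c x := by
  cases x with
  | nil => rfl
  | cons b t =>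
    simp only [pvSq]
    rw [if_neg (fun h => ha h.1)]

theorem pvSq_cons_c (c : Char) (x : List Char) :
    pvSq c (c :: x) = if (pvSq c x).head? = some c then pvSq c x else c :: pvSq c x := by
  cases x with
  | nil => rfl
  | cons b t =>
    by_cases hb : b = c
    · rw [show pvSq c (c :: b :: t) = pvSq c (b :: t) from by simp [pvSq, hb]]
      rw [if_pos (by rw [hb]; exact pvSq_head_c c t)]
    · rw [show pvSq c (c :: b :: t) = c :: pvSq c (b :: t) from by
        simp only [pvSq]; rw [if_neg (fun h => hb h.2)]]
      rw [if_neg (by rw [pvSq_head_ne c b t hb]; simp [hb])]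

theorem pvSq_dropWhile (c : Char) : ∀ t : List Char,
    pvSq c (c :: t) = c :: pvSq c (t.dropWhile (· == c)) := by
  intro t
  induction t with
  | nil => rfl
  | cons b t ih =>
    by_cases hb : b = c
    · rw [show pvSq c (c :: b :: t) = pvSq c (b :: t) from by simp [pvSq, hb], hb]
      rw [ih]
      simp [List.dropWhile]
    · rw [pvSq_cons_c, pvSq_head_ne c b t hb, if_neg (by simp [hb])]
      have hbb : (b == c) = false := by simp [hb]
      simp [List.dropWhile, hbb]

theorem pvSq_rep (c : Char) : ∀ s : List Char, pvSq c (pvRep c s) = pvSq c s := by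
  intro s
  fun_induction pvRep with
  | case1 => rfl
  | case2 a => rfl
  | case3 a b t hab ih =>
    rw [show pvSq c (a :: b :: t) = pvSq c (b :: t) from by simp [pvSq, hab], hab.2]
    rw [pvSq_cons_c, pvSq_cons_c, ih]
  | case4 a b t hab ih =>
    by_cases ha : a = c
    · rw [ha, pvSq_cons_c, pvSq_cons_c, ih]
    · rw [pvSq_cons_ne c a _ ha, pvSq_cons_ne c a _ ha, ih]

theorem pvSq_of_no_infix (c : Char) : ∀ s : List Char, ¬ ([c, c] <:+: s) → pvSq c s = s := by
  intro s
  fun_induction pvSq with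
  | case1 => intro _; rfl
  | case2 a => intro _; rfl
  | case3 a b t hab ih =>
    intro h
    exfalso
    apply h
    rw [hab.1, hab.2]
    exact List.IsPrefix.isInfix ⟨t, rfl⟩
  | case4 a b t hab ih =>
    intro h
    rw [ih (fun hi => h (hi.trans (List.suffix_cons a (b :: t)).isInfix))]

theorem pvCollapse_eq_sq (c : Char) : ∀ s : List Char, pvCollapse c s = pvSq c s := by
  intro s
  fun_induction pvCollapse with
  | case1 s h ih =>
    rw [ih, pv_replace_eq, pvSq_rep]
  | case2 s h =>
    have hfind : PySem.Chars.find s [c, c] = -1 := by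
      have := PySem.Chars.neg_one_le_find s [c, c]
      omega
    rw [pvSq_of_no_infix c s ((PySem.Chars.find_eq_neg_one_iff s [c, c]).mp hfind)]
def pvScanC (c : Char) : List Char → Bool → List Char
  | [], _ => []
  | a :: t, cap =>
    if a = c then pvScanC c t true
    else (if cap then PySem.Chars.upperChar a else a) :: pvScanC c t false
theorem pvCapA_cons (a : Char) (t : List Char) :
    pvCapA (a :: t) = PySem.Chars.upperChar a :: t := by
  simp [pvCapA, pysem, PySem.List.slice]

theorem pv_head_dropWhile {p : Char → Bool} : ∀ (l : List Char) (a : Char),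
    (l.dropWhile p).head? = some a → p a = false := by
  intro l
  induction l with
  | nil => intro a h; simp [List.dropWhile] at h
  | cons b t ih =>
    intro a h
    by_cases hb : p b
    · exact ih a (by simpa [List.dropWhile, hb] using h)
    · rw [List.dropWhile_cons_of_neg hb] at h
      simp at h
      rw [← h]
      simpa using hb

theorem pv_getLast_opt_suffix {u t : List Char} (h : u <:+ t) (hu : u ≠ []) :
    u.getLast? = t.getLast? := by
  obtain ⟨w, rfl⟩ := h
  exact (List.getLast?_append_of_ne_nil _ hu).symm

theorem pvScanC_dropWhile (c : Char) : ∀ t : List Char,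
    pvScanC c t true = pvScanC c (t.dropWhile (· == c)) true := by
  intro t
  induction t with
  | nil => rfl
  | cons b t ih =>
    by_cases hb : b = c
    · have hbb : (b == c) = true := by simp [hb]
      rw [show pvScanC c (b :: t) true = pvScanC c t true from by simp [pvScanC, hb]]
      rw [show List.dropWhile (· == c) (b :: t) = List.dropWhile (· == c) t from by
        simp [hbb]]
      exact ih
    · have hbb : (b == c) = false := by simp [hb]
      rw [show List.dropWhile (· == c) (b :: t) = b :: t from by
        simp [hbb]]

theorem pvMain (c : Char) : ∀ n : Nat,
    (∀ t : List Char, t.length ≤ n → t.getLast? ≠ some c →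
      (pvSpl c (pvSq c t)).headD [] ++ ((pvSpl c (pvSq c t)).tail).flatMap pvCapA =
        pvScanC c t false)
    ∧ (∀ s : List Char, s.length ≤ n → s ≠ [] → s.head? ≠ some c → s.getLast? ≠ some c →
      (pvSpl c (pvSq c s)).flatMap pvCapA = pvScanC c s true) := by
  intro n
  induction n with
  | zero =>
    constructor
    · intro t ht _
      have : t = [] := by cases t <;> simp_all
      subst this
      rfl
    · intro s hs hne _ _
      exact absurd (by cases s <;> simp_all : s = []) hne
  | succ n ih =>
    have part1 : ∀ t : List Char, t.length ≤ n + 1 → t.getLast? ≠ some c →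
        (pvSpl c (pvSq c t)).headD [] ++ ((pvSpl c (pvSq c t)).tail).flatMap pvCapA =
          pvScanC c t false := by
      intro t ht hlast
      match t with
      | [] => rfl
      | a :: t' =>
        by_cases hac : a = c
        · -- leading separator: t' nonempty, ends ≠ c
          have ht'ne : t' ≠ [] := by
            intro h; subst h
            exact hlast (by rw [hac]; rfl)
          have hlast' : t'.getLast? ≠ some c := by
            cases t' with
            | nil => simp
            | cons b t'' => rwa [List.getLast?_cons_cons] at hlast
          set u := t'.dropWhile (· == c) with hu
          have hune : u ≠ [] := by
            intro h
            have hall := List.dropWhile_eq_nil_iff.mp h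
            obtain ⟨z, hz⟩ : ∃ z, t'.getLast? = some z := by
              cases hzz : t'.getLast? with
              | none => exact absurd (List.getLast?_eq_none_iff.mp hzz) ht'ne
              | some z => exact ⟨z, rfl⟩
            have hzc : z = c := by
              have := hall _ (List.mem_of_getLast? hz)
              simpa using this
            exact hlast' (hzc ▸ hz)
          have huhead : u.head? ≠ some c := by
            intro h
            have := pv_head_dropWhile t' c h
            simp at this
          have hulast : u.getLast? ≠ some c := by
            rw [pv_getLast_opt_suffix (List.dropWhile_suffix _) hune]
            exact hlast'
          have hulen : u.length ≤ n := by
            rw [hu]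
            have h1 := List.length_dropWhile_le (p := (· == c)) (l := t')
            simp at ht
            omega
          rw [hac, pvSq_dropWhile]
          rw [show pvSpl c (c :: pvSq c u) = [] :: pvSpl c (pvSq c u) from by simp [pvSpl]]
          simp only [List.headD_cons, List.tail_cons, List.nil_append]
          rw [ih.2 u hulen hune huhead hulast]
          rw [show pvScanC c (c :: t') false = pvScanC c t' true from by simp [pvScanC]]
          rw [pvScanC_dropWhile c t']
        · have hlast' : t'.getLast? ≠ some c := by
            cases t' with
            | nil => simp
            | cons b t'' => rwa [List.getLast?_cons_cons] at hlast
          rw [pvSq_cons_ne c a _ hac]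
          obtain ⟨hh, hr, hsp⟩ : ∃ hh hr, pvSpl c (pvSq c t') = hh :: hr := by
            cases hsp : pvSpl c (pvSq c t') with
            | nil => exact absurd hsp (pvSpl_ne_nil c _)
            | cons x y => exact ⟨x, y, rfl⟩
          rw [show pvSpl c (a :: pvSq c t') = (a :: hh) :: hr from by
            simp only [pvSpl]; rw [if_neg hac, hsp]]
          simp only [List.headD_cons, List.tail_cons]
          have hIH := ih.1 t' (by simp at ht; omega) hlast'
          rw [hsp] at hIH
          simp only [List.headD_cons, List.tail_cons] at hIH
          rw [show pvScanC c (a :: t') false = a :: pvScanC c t' false from by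
            simp [pvScanC, hac]]
          rw [List.cons_append, hIH]
    refine ⟨part1, ?_⟩
    intro s hs hne hhead hlast
    match s with
    | a :: t =>
      have hac : a ≠ c := by intro h; exact hhead (by rw [h]; rfl)
      have hlast' : t.getLast? ≠ some c := by
        cases t with
        | nil => simp
        | cons b t'' => rwa [List.getLast?_cons_cons] at hlast
      rw [pvSq_cons_ne c a _ hac]
      obtain ⟨hh, hr, hsp⟩ : ∃ hh hr, pvSpl c (pvSq c t) = hh :: hr := by
        cases hsp : pvSpl c (pvSq c t) with
        | nil => exact absurd hsp (pvSpl_ne_nil c _)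
        | cons x y => exact ⟨x, y, rfl⟩
      rw [show pvSpl c (a :: pvSq c t) = (a :: hh) :: hr from by
        simp only [pvSpl]; rw [if_neg hac, hsp]]
      have hIH := part1 t (by simp at hs; omega) hlast'
      rw [hsp] at hIH
      simp only [List.headD_cons, List.tail_cons] at hIH
      rw [show pvScanC c (a :: t) true = PySem.Chars.upperChar a :: pvScanC c t false from by
        simp [pvScanC, hac]]
      simp only [List.flatMap_cons, pvCapA_cons]
      rw [List.cons_append, hIH]
theorem pv_getLast_opt_cons_ne_nil (x : Char) (l : List Char) (h : l ≠ []) :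
    (x :: l).getLast? = l.getLast? := by
  cases l with
  | nil => exact absurd rfl h
  | cons b t => exact List.getLast?_cons_cons

theorem pvScanC_getLast (c : Char) : ∀ (s : List Char) (cap : Bool), s ≠ [] →
    s.getLast? ≠ some c →
    ∃ z, s.getLast? = some z ∧
      ((pvScanC c s cap).getLast? = some z ∨
       (pvScanC c s cap).getLast? = some (PySem.Chars.upperChar z)) := by
  intro s
  induction s with
  | nil => intro cap h; exact absurd rfl h
  | cons a t ih =>
    intro cap _ hlast
    cases t with
    | nil =>
      have hac : a ≠ c := by intro h; exact hlast (by rw [h]; rfl)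
      refine ⟨a, rfl, ?_⟩
      cases cap
      · left; simp [pvScanC, hac]
      · right; simp [pvScanC, hac]
    | cons b t' =>
      have hlast' : (b :: t').getLast? ≠ some c := by
        rwa [List.getLast?_cons_cons] at hlast
      by_cases hac : a = c
      · obtain ⟨z, hz, hor⟩ := ih true (by simp) hlast'
        exact ⟨z, by rw [List.getLast?_cons_cons]; exact hz,
          by rwa [show pvScanC c (a :: b :: t') cap = pvScanC c (b :: t') true from by
            simp [pvScanC, hac]]⟩
      · obtain ⟨z, hz, hor⟩ := ih false (by simp) hlast'
        have hne : pvScanC c (b :: t') false ≠ [] := by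
          intro h
          rcases hor with h1 | h1 <;> rw [h] at h1 <;> simp at h1
        refine ⟨z, by rw [List.getLast?_cons_cons]; exact hz, ?_⟩
        rw [show pvScanC c (a :: b :: t') cap =
            (if cap then PySem.Chars.upperChar a else a) :: pvScanC c (b :: t') false from by
          simp [pvScanC, hac]]
        rwa [pv_getLast_opt_cons_ne_nil _ _ hne]

theorem pv_isspace_false_ne_space {a : Char} (h : PySem.Chars.isspace a = false) : a ≠ ' ' := by
  intro hc
  rw [hc] at h
  exact absurd h (by decide)

theorem pv_strip_head {w : List Char} {a : Char}
    (h : (PySem.Chars.strip w).head? = some a) : PySem.Chars.isspace a = false := by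
  have hpref : PySem.Chars.strip w <+: PySem.Chars.lstrip w := by
    unfold PySem.Chars.strip PySem.Chars.rstrip
    have h1 : List.dropWhile PySem.Chars.isspace (PySem.Chars.lstrip w).reverse <:+
        (PySem.Chars.lstrip w).reverse := List.dropWhile_suffix _
    have h2 := List.reverse_prefix.mpr h1
    rwa [List.reverse_reverse] at h2
  obtain ⟨v, hv⟩ := hpref
  have hne : PySem.Chars.strip w ≠ [] := by
    intro hh; rw [hh] at h; simp at h
  have : (PySem.Chars.lstrip w).head? = some a := by
    rw [← hv, List.head?_append_of_ne_nil _ hne]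
    exact h
  exact pv_head_dropWhile w a this

theorem pv_strip_last {w : List Char} {z : Char}
    (h : (PySem.Chars.strip w).getLast? = some z) : PySem.Chars.isspace z = false := by
  unfold PySem.Chars.strip PySem.Chars.rstrip at h
  rw [List.getLast?_reverse] at h
  exact pv_head_dropWhile _ z h


theorem pv_upper_space : PySem.Chars.upperChar ' ' = ' ' := by decide

theorem pvU1 : ∀ t : List Char,
    pvScanC ' ' (pvScanC '_' t true) true = pvScanC ' ' (pvScanC '_' t true) false := by
  intro t
  induction t with
  | nil => rfl
  | cons a t ih =>
    by_cases ha : a = '_'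
    · rw [show pvScanC '_' (a :: t) true = pvScanC '_' t true from by simp [pvScanC, ha]]
      exact ih
    · rw [show pvScanC '_' (a :: t) true =
          PySem.Chars.upperChar a :: pvScanC '_' t false from by simp [pvScanC, ha]]
      by_cases hsp : a = ' '
      · rw [hsp, pv_upper_space]
        simp [pvScanC]
      · have hup : PySem.Chars.upperChar a ≠ ' ' := up_ne_space a hsp
        simp [pvScanC, hup, up_up]

theorem pvU3 : ∀ t : List Char,
    pvScanC ' ' (pvScanC '_' t false) true = pvScanC ' ' (pvScanC '_' t true) true := by
  intro t
  cases t with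
  | nil => rfl
  | cons a t =>
    by_cases ha : a = '_'
    · rw [show pvScanC '_' (a :: t) false = pvScanC '_' t true from by simp [pvScanC, ha],
          show pvScanC '_' (a :: t) true = pvScanC '_' t true from by simp [pvScanC, ha]]
    · rw [show pvScanC '_' (a :: t) false = a :: pvScanC '_' t false from by
          simp [pvScanC, ha],
        show pvScanC '_' (a :: t) true = PySem.Chars.upperChar a :: pvScanC '_' t false from by
          simp [pvScanC, ha]]
      by_cases hsp : a = ' '
      · rw [hsp, pv_upper_space]
      · have hup : PySem.Chars.upperChar a ≠ ' ' := up_ne_space a hsp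
        simp [pvScanC, hsp, hup, up_up]

theorem pvP2 : ∀ (t : List Char) (cap : Bool),
    pvScanC ' ' (pvScanC '_' t cap) cap = pvScan t cap := by
  intro t
  induction t with
  | nil => intro cap; rfl
  | cons a t ih =>
    intro cap
    by_cases ha : a = '_'
    · rw [show pvScanC '_' (a :: t) cap = pvScanC '_' t true from by simp [pvScanC, ha],
          show pvScan (a :: t) cap = pvScan t true from by simp [pvScan, ha]]
      cases cap
      · rw [← pvU1, ih true]
      · exact ih true
    · by_cases hsp : a = ' '
      · rw [show pvScanC '_' (a :: t) cap = ' ' :: pvScanC '_' t false from by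
            cases cap <;> simp [pvScanC, hsp, pv_upper_space],
          show pvScan (a :: t) cap = pvScan t true from by simp [pvScan, hsp],
          show pvScanC ' ' (' ' :: pvScanC '_' t false) cap =
            pvScanC ' ' (pvScanC '_' t false) true from by simp [pvScanC],
          pvU3, ih true]
      · have hup : PySem.Chars.upperChar a ≠ ' ' := up_ne_space a hsp
        cases cap
        · simp [pvScanC, pvScan, ha, hsp, ih false]
        · simp [pvScanC, pvScan, ha, hsp, hup, up_up, ih false]
theorem pvPassA_eq (c : Char) (s : List Char) (h1 : s ≠ []) (h2 : s.head? ≠ some c)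
    (h3 : s.getLast? ≠ some c) : pvPassA c s = pvScanC c s true := by
  unfold pvPassA
  rw [PySem.List.foldl_append_eq_flatMap, List.nil_append, pvCollapse_eq_sq, pv_splitOn_eq]
  exact (pvMain c s.length).2 s le_rfl h1 h2 h3

theorem pv_final (cmdname : String)
    (hne : PySem.Chars.strip (PySem.Chars.lower cmdname.toList) ≠ [])
    (hh : (PySem.Chars.strip (PySem.Chars.lower cmdname.toList)).head? ≠ some '_')
    (hl : (PySem.Chars.strip (PySem.Chars.lower cmdname.toList)).getLast? ≠ some '_') :
    GetFuncName cmdname = GetFuncName_alt cmdname := by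
  unfold GetFuncName GetFuncName_alt
  set s0 := PySem.Chars.strip (PySem.Chars.lower cmdname.toList) with hs0
  congr 1
  rw [pvPassA_eq '_' s0 hne hh hl]
  obtain ⟨a0, t0, hcons⟩ : ∃ a0 t0, s0 = a0 :: t0 := by
    cases h : s0 with
    | nil => exact absurd h hne
    | cons x y => exact ⟨x, y, rfl⟩
  have ha0 : a0 ≠ '_' := by
    intro h; rw [hcons, h] at hh; exact hh rfl
  have ha0sp : a0 ≠ ' ' := by
    apply pv_isspace_false_ne_space
    apply pv_strip_head (w := PySem.Chars.lower cmdname.toList)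
    rw [← hs0, hcons]; rfl
  have hy : pvScanC '_' s0 true = PySem.Chars.upperChar a0 :: pvScanC '_' t0 false := by
    rw [hcons]; simp [pvScanC, ha0]
  have hyne : pvScanC '_' s0 true ≠ [] := by rw [hy]; simp
  have hyh : (pvScanC '_' s0 true).head? ≠ some ' ' := by
    rw [hy]
    simp only [List.head?_cons, ne_eq, Option.some.injEq]
    exact up_ne_space a0 ha0sp
  have hyl : (pvScanC '_' s0 true).getLast? ≠ some ' ' := by
    obtain ⟨z, hz, hor⟩ := pvScanC_getLast '_' s0 true hne hl
    have hzsp : z ≠ ' ' :=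
      pv_isspace_false_ne_space (pv_strip_last (w := PySem.Chars.lower cmdname.toList)
        (by rw [← hs0]; exact hz))
    rcases hor with h1 | h1 <;> rw [h1] <;> simp only [ne_eq, Option.some.injEq]
    · exact hzsp
    · exact up_ne_space z hzsp
  rw [pvPassA_eq ' ' _ hyne hyh hyl]
  exact pvP2 s0 true

-- ===== VERDICT (by name: the statement is the Claim_ definition above) =====
theorem GetFuncName_spec : Claim_equal_GetFuncName := by
  intro cmdname _ hpre
  obtain ⟨h1, h2, h3⟩ := hpre
  unfold Spec_GetFuncName
  exact pv_final cmdname h1 h2 h3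

@[simp]
theorem GetFuncName_raises : Claim_raises_GetFuncName := by
  unfold Claim_raises_GetFuncName
  refine ⟨?_, by decide⟩
  intro cmdname _ hr hp
  obtain ⟨h1, h2, h3⟩ := hp
  rcases hr with h | h | h
  · exact h1 h
  · exact h2 h
  · exact h3 h
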